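-- pv_equiv track=rewrite | github.com/wanderingbackorforward/ygzl_2026_1 | backend/modules/insar/service.py | _meta_from_cached_zones
-- ===== SOURCE A (Python) =====
-- from typing import Any, Dict, List, Optional, Tuple
--
-- def _meta_from_cached_zones(geo: Dict[str, Any]) -> Dict[str, Any]:
--     """从缓存的区域 GeoJSON 重建统计元数据"""
--     feats = (geo or {}).get("features") or []
--     danger = sum(1 for f in feats if (f.get("properties") or {}).get("level") == "danger")
--     warning = sum(1 for f in feats if (f.get("properties") or {}).get("level") == "warning")
--     return {
--         "zone_count": len(feats),
--         "danger_zone_count": danger,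
--         "warning_zone_count": warning,
--     }
-- ===== SOURCE B (Python) =====
-- def _meta_from_cached_zones(geo):
--     """One pass: build a frequency table of levels, then read off the two counts."""
--     feats = (geo or {}).get("features") or []
--     counts = {}
--     for f in feats:
--         level = (f.get("properties") or {}).get("level")
--         counts[level] = counts.get(level, 0) + 1
--     return {
--         "zone_count": len(feats),
--         "danger_zone_count": counts.get("danger", 0),
--         "warning_zone_count": counts.get("warning", 0),
--     }
-- ===== Notes on version B (the rewrite author's own statement) =====
-- stated objective: alternative
-- what changed: Replaces the two filtered generator sums (two scans of feats) with a single loop that builds one frequency table of all levels and reads the two counts from it afterwards.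
import Mathlib
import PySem

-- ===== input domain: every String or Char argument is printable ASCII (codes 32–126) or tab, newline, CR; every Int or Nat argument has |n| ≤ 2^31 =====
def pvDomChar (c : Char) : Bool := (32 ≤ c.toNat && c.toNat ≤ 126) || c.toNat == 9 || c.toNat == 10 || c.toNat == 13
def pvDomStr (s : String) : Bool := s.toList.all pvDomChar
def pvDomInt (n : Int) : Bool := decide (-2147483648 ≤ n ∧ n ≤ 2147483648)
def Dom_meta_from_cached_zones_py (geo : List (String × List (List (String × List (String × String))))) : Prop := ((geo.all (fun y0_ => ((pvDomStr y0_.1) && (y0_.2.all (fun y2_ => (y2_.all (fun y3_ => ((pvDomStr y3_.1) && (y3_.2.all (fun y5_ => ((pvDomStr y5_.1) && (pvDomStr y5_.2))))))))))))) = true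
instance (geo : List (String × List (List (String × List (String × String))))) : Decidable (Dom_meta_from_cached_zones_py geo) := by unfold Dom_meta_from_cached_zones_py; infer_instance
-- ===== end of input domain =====

-- B replaces A's two filtered sums over feats by a single pass that builds one
-- frequency table of all levels and reads the two counts from it (alternative decomposition).

-- shared transliteration of the identical Python expressions
--   feats = (geo or {}).get("features") or []
def pvFeats (geo : List (String × List (List (String × List (String × String))))) :
    List (List (String × List (String × String))) :=
  let g := if geo = [] then [] else geo
  match (PySem.Dict.mk g).get? "features" with
  | some v => if v = [] then [] else v
  | none => []

--   (f.get("properties") or {}).get("level")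
def pvLevel (f : List (String × List (String × String))) : Option String :=
  let props := match (PySem.Dict.mk f).get? "properties" with
               | some p => if p = [] then [] else p
               | none => []
  (PySem.Dict.mk props).get? "level"

-- ===== PORT A =====
-- two generator sums, each a filtered scan of feats
def meta_from_cached_zones_py (geo : List (String × List (List (String × List (String × String))))) : List (String × Int) :=
  let feats := pvFeats geo
  let danger := feats.foldl (fun acc f => if pvLevel f = some "danger" then acc + 1 else acc) (0 : Int)
  let warning := feats.foldl (fun acc f => if pvLevel f = some "warning" then acc + 1 else acc) (0 : Int)
  [("zone_count", (feats.length : Int)),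
   ("danger_zone_count", danger),
   ("warning_zone_count", warning)]

-- ===== PORT B =====
-- one pass building a frequency table counts[level] = counts.get(level, 0) + 1
def meta_from_cached_zones_py_alt (geo : List (String × List (List (String × List (String × String))))) : List (String × Int) :=
  let feats := pvFeats geo
  let counts := feats.foldl
    (fun (d : PySem.Dict (Option String) Int) f =>
      let level := pvLevel f
      d.insert level (d.getD level 0 + 1)) PySem.Dict.empty
  [("zone_count", (feats.length : Int)),
   ("danger_zone_count", counts.getD (some "danger") 0),
   ("warning_zone_count", counts.getD (some "warning") 0)]

-- ===== PRECONDITION & SPEC =====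
def Spec_meta_from_cached_zones_py (geo : List (String × List (List (String × List (String × String))))) (out : List (String × Int)) : Prop := out = meta_from_cached_zones_py_alt geo
instance (geo : List (String × List (List (String × List (String × String))))) (out : List (String × Int)) : Decidable (Spec_meta_from_cached_zones_py geo out) := by unfold Spec_meta_from_cached_zones_py; infer_instance

-- ===== CLAIM =====
def Claim_equal_meta_from_cached_zones_py : Prop := ∀ (geo : List (String × List (List (String × List (String × String))))), Dom_meta_from_cached_zones_py geo → Spec_meta_from_cached_zones_py geo (meta_from_cached_zones_py geo)

-- ===== LEMMAS AND PROOFS =====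
theorem pvSumIf_eq_count (l : List (List (String × List (String × String)))) (k : Option String) (a : Int) :
    l.foldl (fun acc f => if pvLevel f = k then acc + 1 else acc) a
      = a + ((l.map pvLevel).count k : Int) := by
  induction l generalizing a with
  | nil => simp
  | cons f t ih =>
    simp only [List.foldl_cons, List.map_cons, ih]
    rcases eq_or_ne (pvLevel f) k with h | h
    · simp [h]; omega
    · simp [h]

theorem pvCounts_getD (l : List (List (String × List (String × String)))) (k : Option String) :
    (l.foldl (fun (d : PySem.Dict (Option String) Int) f =>
        d.insert (pvLevel f) (d.getD (pvLevel f) 0 + 1)) PySem.Dict.empty).getD k 0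
      = ((l.map pvLevel).count k : Int) := by
  rw [← List.foldl_map (f := pvLevel)
        (g := fun (d : PySem.Dict (Option String) Int) x => d.insert x (d.getD x 0 + 1))]
  rw [PySem.Dict.getD_foldl_insert_add_one]
  simp

-- ===== VERDICT =====
theorem meta_from_cached_zones_py_spec : Claim_equal_meta_from_cached_zones_py := by
  intro geo _
  unfold Spec_meta_from_cached_zones_py meta_from_cached_zones_py meta_from_cached_zones_py_alt
  simp only [pvSumIf_eq_count, pvCounts_getD, zero_add]
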